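-- pv_equiv track=rewrite | github.com/batamorphism/Coding | Python/AtCoder/arc087_b_0223.py | check
-- ===== SOURCE A (Python) =====
-- def check(x_list, en_x):
--     # x_listの値を足したり引いたりして、en_xになるかを判定
--     dp = set([0])
--     for dx_list in x_list:
--         nex_dp = set()
--         for dx in dx_list:
--             for cur_x in dp:
--                 nex_x = cur_x + dx
--                 nex_dp.add(nex_x)
--         dp = nex_dp.copy()
--     return en_x in dp
-- ===== SOURCE B (Python) =====
-- def check(x_list, en_x):
--     # Meet in the middle: reachable sums of each half of the group list,
--     # then match the halves; the combined sum set is never materialised.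
--     def sums(groups):
--         acc = {0}
--         for g in groups:
--             acc = {c + d for c in acc for d in g}
--         return acc
--     mid = len(x_list) // 2
--     right = sums(x_list[mid:])
--     return any(en_x - a in right for a in sums(x_list[:mid]))
-- ===== Notes on version B (the rewrite author's own statement) =====
-- stated objective: alternative
-- what changed: Replaces A's single full-length frontier-set sweep plus final membership test by a meet-in-the-middle: the reachable-sum sets of the two halves of the group list are built separately and matched via 'en_x - a in right', so the combined final sum set is never materialised.
import Mathlib
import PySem

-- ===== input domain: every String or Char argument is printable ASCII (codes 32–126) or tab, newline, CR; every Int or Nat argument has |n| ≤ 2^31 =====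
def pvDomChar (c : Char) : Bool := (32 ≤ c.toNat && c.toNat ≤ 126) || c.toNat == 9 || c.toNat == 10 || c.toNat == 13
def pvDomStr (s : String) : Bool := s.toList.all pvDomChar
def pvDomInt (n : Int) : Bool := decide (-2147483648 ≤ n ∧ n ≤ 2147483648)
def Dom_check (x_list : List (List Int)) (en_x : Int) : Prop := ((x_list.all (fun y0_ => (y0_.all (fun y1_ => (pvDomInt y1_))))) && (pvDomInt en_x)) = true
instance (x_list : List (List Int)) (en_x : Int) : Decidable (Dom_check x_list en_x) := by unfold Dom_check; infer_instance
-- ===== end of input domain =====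

-- B replaces A's left-to-right frontier sweep by a divide-and-conquer with a
-- meet-in-the-middle final membership test (alternative structure, same results).


-- ===== PORT A =====
-- dp = set([0]); for dx_list in x_list: nex_dp = {cur_x + dx for dx in dx_list for cur_x in dp}; dp = nex_dp
-- (iterating dp only to fill another set: result is order-independent); return en_x in dp
def check (x_list : List (List Int)) (en_x : Int) : Bool :=
  let dp := x_list.foldl
    (fun dp dx_list =>
      dx_list.foldl
        (fun nex_dp dx =>
          dp.foldl (fun nd cur_x => PySem.Set.add nd (cur_x + dx)) nex_dp)
        PySem.Set.empty)
    (PySem.Set.ofList [0])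
  PySem.Set.contains dp en_x

-- ===== PORT B =====
-- sums(groups): acc = {0}; for g in groups: acc = {c + d for c in acc for d in g}
-- (iterated only to fill another set: order-independent as a set);
-- x_list[:mid] = take mid, x_list[mid:] = drop mid — exact for 0 ≤ mid ≤ len
def sumsAlt (groups : List (List Int)) : PySem.Set Int :=
  groups.foldl
    (fun acc g => PySem.Set.ofList (acc.flatMap (fun c => g.map (fun d => c + d))))
    (PySem.Set.ofList [0])

def check_alt (x_list : List (List Int)) (en_x : Int) : Bool :=
  let mid := x_list.length / 2
  let right := sumsAlt (x_list.drop mid)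
  (sumsAlt (x_list.take mid)).any (fun a => PySem.Set.contains right (en_x - a))

-- ===== PRECONDITION & SPEC =====
def Spec_check (x_list : List (List Int)) (en_x : Int) (out : Bool) : Prop := out = check_alt x_list en_x
instance (x_list : List (List Int)) (en_x : Int) (out : Bool) : Decidable (Spec_check x_list en_x out) := by unfold Spec_check; infer_instance

-- ===== CLAIM (what is proved, stated in full; the proofs are below) =====
def Claim_equal_check : Prop := ∀ (x_list : List (List Int)) (en_x : Int), Dom_check x_list en_x → Spec_check x_list en_x (check x_list en_x)

-- ===== LEMMAS AND PROOFS =====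

-- x is a sum picking exactly one element from each group, in order
def Reach : List (List Int) → Int → Prop
  | [], x => x = 0
  | g :: gs, x => ∃ d ∈ g, Reach gs (x - d)

theorem reach_append (l r : List (List Int)) (x : Int) :
    Reach (l ++ r) x ↔ ∃ a b : Int, Reach l a ∧ Reach r b ∧ x = a + b := by
  induction l generalizing x with
  | nil =>
    simp only [List.nil_append, Reach]
    constructor
    · intro h; exact ⟨0, x, rfl, h, by ring⟩
    · rintro ⟨a, b, ha, hb, hx⟩; subst ha; simpa [hx] using hb
  | cons g l ih =>
    simp only [List.cons_append, Reach]
    constructor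
    · rintro ⟨d, hd, h⟩
      rcases (ih _).1 h with ⟨a, b, ha, hb, hx⟩
      exact ⟨d + a, b, ⟨d, hd, by simpa using ha⟩, hb, by omega⟩
    · rintro ⟨a, b, ⟨d, hd, ha⟩, hb, hx⟩
      exact ⟨d, hd, (ih _).2 ⟨a - d, b, ha, hb, by omega⟩⟩

-- membership through A's inner two loops over one group
theorem mem_inner (dx_list dp : List Int) (y : Int) :
    y ∈ dx_list.foldl
        (fun nex_dp dx =>
          dp.foldl (fun nd cur_x => PySem.Set.add nd (cur_x + dx)) nex_dp)
        PySem.Set.empty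
      ↔ ∃ dx ∈ dx_list, ∃ c ∈ dp, y = c + dx := by
  suffices h : ∀ (init : List Int),
      y ∈ dx_list.foldl
          (fun nex_dp dx =>
            dp.foldl (fun nd cur_x => PySem.Set.add nd (cur_x + dx)) nex_dp)
          init
        ↔ y ∈ init ∨ ∃ dx ∈ dx_list, ∃ c ∈ dp, y = c + dx by
    simpa [PySem.Set.empty] using h PySem.Set.empty
  induction dx_list with
  | nil => simp
  | cons dx rest ih =>
    intro init
    simp only [List.foldl_cons, ih, PySem.Set.mem_foldl_add, List.mem_cons]
    constructor
    · rintro (⟨h | ⟨c, hc, hy⟩⟩ | ⟨d, hd, c, hc, hy⟩)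
      · exact Or.inl h
      · exact Or.inr ⟨dx, Or.inl rfl, c, hc, hy⟩
      · exact Or.inr ⟨d, Or.inr hd, c, hc, hy⟩
    · rintro (h | ⟨d, rfl | hd, c, hc, hy⟩)
      · exact Or.inl (Or.inl h)
      · exact Or.inl (Or.inr ⟨c, hc, hy⟩)
      · exact Or.inr ⟨d, hd, c, hc, hy⟩

-- membership through A's outer loop
theorem mem_outer (gs : List (List Int)) (dp : List Int) (y : Int) :
    y ∈ gs.foldl
        (fun dp dx_list =>
          dx_list.foldl
            (fun nex_dp dx =>
              dp.foldl (fun nd cur_x => PySem.Set.add nd (cur_x + dx)) nex_dp)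
            PySem.Set.empty)
        dp
      ↔ ∃ c ∈ dp, Reach gs (y - c) := by
  induction gs generalizing dp y with
  | nil => simp [Reach, sub_eq_zero]
  | cons g gs ih =>
    simp only [List.foldl_cons, ih, Reach]
    constructor
    · rintro ⟨c, hc, h⟩
      rcases (mem_inner g dp c).1 hc with ⟨d, hd, c', hc', rfl⟩
      exact ⟨c', hc', d, hd, by simpa [sub_sub] using h⟩
    · rintro ⟨c, hc, d, hd, h⟩
      exact ⟨c + d, (mem_inner g dp _).2 ⟨d, hd, c, hc, rfl⟩, by simpa [sub_sub] using h⟩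

theorem check_iff (x_list : List (List Int)) (en_x : Int) :
    check x_list en_x = true ↔ Reach x_list en_x := by
  simp only [check, PySem.Set.contains_iff, mem_outer]
  constructor
  · rintro ⟨c, hc, h⟩
    simp only [PySem.Set.mem_ofList, List.mem_singleton] at hc
    simpa [hc] using h
  · intro h; exact ⟨0, by simp [PySem.Set.mem_ofList], by simpa using h⟩

theorem mem_sumsAlt (gs : List (List Int)) : ∀ (y : Int),
    y ∈ sumsAlt gs ↔ Reach gs y := by
  suffices h : ∀ (acc : List Int) (y : Int),
      y ∈ gs.foldl
          (fun acc g => PySem.Set.ofList (acc.flatMap (fun c => g.map (fun d => c + d))))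
          acc
        ↔ ∃ c ∈ acc, Reach gs (y - c) by
    intro y
    rw [sumsAlt, h]
    constructor
    · rintro ⟨c, hc, hr⟩
      simp only [PySem.Set.mem_ofList, List.mem_singleton] at hc
      simpa [hc] using hr
    · intro hr; exact ⟨0, by simp [PySem.Set.mem_ofList], by simpa using hr⟩
  induction gs with
  | nil => intro acc y; simp [Reach, sub_eq_zero]
  | cons g gs ih =>
    intro acc y
    simp only [List.foldl_cons, ih, PySem.Set.mem_ofList, List.mem_flatMap, List.mem_map,
      Reach]
    constructor
    · rintro ⟨c', ⟨c, hc, d, hd, rfl⟩, hr⟩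
      exact ⟨c, hc, d, hd, by simpa [sub_sub] using hr⟩
    · rintro ⟨c, hc, d, hd, hr⟩
      exact ⟨c + d, ⟨c, hc, d, hd, rfl⟩, by simpa [sub_sub] using hr⟩

theorem check_alt_iff (x_list : List (List Int)) (en_x : Int) :
    check_alt x_list en_x = true ↔ Reach x_list en_x := by
  have hr := reach_append (x_list.take (x_list.length / 2))
    (x_list.drop (x_list.length / 2)) en_x
  rw [List.take_append_drop] at hr
  simp only [check_alt, List.any_eq_true, PySem.Set.contains_iff, mem_sumsAlt]
  rw [hr]
  constructor
  · rintro ⟨a, ha, hb⟩; exact ⟨a, en_x - a, ha, hb, by ring⟩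
  · rintro ⟨a, b, ha, hb, rfl⟩; exact ⟨a, ha, by simpa using hb⟩

-- ===== VERDICT (by name: the statement is the Claim_ definition above) =====
theorem check_spec : Claim_equal_check := by
  intro x_list en_x _
  unfold Spec_check
  rw [Bool.eq_iff_iff, check_iff, check_alt_iff]
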